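-- pv_equiv track=rewrite | github.com/regularJo96/Four-in-a-Row | connect_four.py | checkDiagonalTopRightToLeft
-- ===== SOURCE A (Python) =====
-- def checkDiagonalTopRightToLeft(player,place,board,count):
--     row=place[0]
--     col=place[1]
--     spot=board[row][col]
--
--     if(spot!=player):
--         return count
--     count=count+1
--     return checkDiagonalTopRightToLeft(player,[row+1,col-1],board,count)
-- ===== SOURCE B (Python) =====
-- def checkDiagonalTopRightToLeft(player, place, board, count):
--     # Iterative: count the run of player's pieces along the down-left diagonal,
--     # then add it to the incoming count once at the end.
--     row = place[0]
--     col = place[1]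
--     n = 0
--     while board[row][col] == player:
--         n += 1
--         row += 1
--         col -= 1
--     return count + n
-- ===== Notes on version B (the rewrite author's own statement) =====
-- stated objective: simpler
-- what changed: Replaced A's tail recursion, which rebuilds a fresh [row+1, col-1] place list and threads count through every call, with an iterative while loop over local row/col variables that counts the run in a local counter and adds it to count once at the end.
import Mathlib
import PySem

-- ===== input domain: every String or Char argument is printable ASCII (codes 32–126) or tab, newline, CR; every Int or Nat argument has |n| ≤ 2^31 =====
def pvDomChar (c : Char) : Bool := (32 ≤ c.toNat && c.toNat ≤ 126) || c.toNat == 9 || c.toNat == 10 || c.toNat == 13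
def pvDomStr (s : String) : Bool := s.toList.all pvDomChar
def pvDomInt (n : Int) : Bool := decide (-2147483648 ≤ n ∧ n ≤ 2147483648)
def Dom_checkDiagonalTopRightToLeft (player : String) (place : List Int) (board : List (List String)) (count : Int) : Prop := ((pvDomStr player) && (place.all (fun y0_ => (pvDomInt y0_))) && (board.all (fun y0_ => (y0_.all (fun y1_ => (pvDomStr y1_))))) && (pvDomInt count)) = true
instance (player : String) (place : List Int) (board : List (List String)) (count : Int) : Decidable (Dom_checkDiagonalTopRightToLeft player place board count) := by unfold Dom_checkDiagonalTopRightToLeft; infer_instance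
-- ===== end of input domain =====

-- B replaces A's tail recursion (which rebuilds the place list and threads count through
-- every call) by an iterative walk with a local run counter added to count once at the end;
-- objective: simpler. Same raw indexing, so A and B raise IndexError on exactly the same inputs.

-- ===== PORT A =====
-- A's recursion: read place[0], place[1], board[row][col]; stop on mismatch, else recurse
-- on [row+1, col-1] with count+1.  `none` from pyGet? marks Python's IndexError (outside Pre_,
-- the port returns count there).
def checkDiagonalTopRightToLeft (player : String) (place : List Int) (board : List (List String)) (count : Int) : Int :=
  match h0 : PySem.List.pyGet? place 0 with
  | none => count
  | some row =>
    match PySem.List.pyGet? place 1 with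
    | none => count
    | some col =>
      match hr : PySem.List.pyGet? board row with
      | none => count
      | some brow =>
        match PySem.List.pyGet? brow col with
        | none => count
        | some spot =>
          if spot ≠ player then count
          else checkDiagonalTopRightToLeft player [row + 1, col - 1] board (count + 1)
termination_by ((board.length : Int) + 1 - (PySem.List.pyGet? place 0).getD 0).toNat
decreasing_by
  have hlt : row < (board.length : Int) := by
    by_contra h
    have : PySem.List.pyGet? board row = none := by
      rw [PySem.List.pyGet?_eq_none_iff]
      intro hin
      exact h hin.2
    simp [this] at hr
  rw [h0, PySem.List.pyGet?_zero_cons]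
  simp only [Option.getD_some]
  omega

-- ===== PORT B =====
-- B's while loop: row, col, n are the loop state; returns the final n (the run length).
def bRun (player : String) (board : List (List String)) (row col n : Int) : Int :=
  match hr : PySem.List.pyGet? board row with
  | none => n
  | some brow =>
    match PySem.List.pyGet? brow col with
    | none => n
    | some spot =>
      if spot == player then bRun player board (row + 1) (col - 1) (n + 1)
      else n
termination_by ((board.length : Int) + 1 - row).toNat
decreasing_by
  have hlt : row < (board.length : Int) := by
    by_contra h
    have : PySem.List.pyGet? board row = none := by
      rw [PySem.List.pyGet?_eq_none_iff]
      intro hin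
      exact h hin.2
    simp [this] at hr
  omega

def checkDiagonalTopRightToLeft_alt (player : String) (place : List Int) (board : List (List String)) (count : Int) : Int :=
  match PySem.List.pyGet? place 0 with
  | none => count
  | some row =>
    match PySem.List.pyGet? place 1 with
    | none => count
    | some col => count + bRun player board row col 0

-- ===== PRECONDITION & SPEC =====
-- the cell board[row+k][col-k] read at step k of the walk (helper for Pre_ only)
def diagCell (board : List (List String)) (row col : Int) (k : Nat) : Option String :=
  (PySem.List.pyGet? board (row + k)).bind (fun r => PySem.List.pyGet? r (col - k))

-- Pre_ = exactly the inputs where Python A returns normally: place has two entries and the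
-- diagonal walk reaches a non-player cell before any index leaves the board (else IndexError).
def Pre_checkDiagonalTopRightToLeft (player : String) (place : List Int) (board : List (List String)) (count : Int) : Prop :=
  2 ≤ place.length ∧
  ∃ k : Nat, k < board.length + board.length + 1 ∧
    (∀ j : Nat, j < k → diagCell board place.headI place.tail.headI j = some player) ∧
    diagCell board place.headI place.tail.headI k ≠ none ∧
    diagCell board place.headI place.tail.headI k ≠ some player
instance (player : String) (place : List Int) (board : List (List String)) (count : Int) : Decidable (Pre_checkDiagonalTopRightToLeft player place board count) := by unfold Pre_checkDiagonalTopRightToLeft; infer_instance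

def pvWitness_checkDiagonalTopRightToLeft : String × List Int × List (List String) × Int :=
  ("X", [0, 2], [["-", "-", "X"], ["-", "X", "-"], ["O", "-", "-"]], 0)

def Spec_checkDiagonalTopRightToLeft (player : String) (place : List Int) (board : List (List String)) (count : Int) (out : Int) : Prop := out = checkDiagonalTopRightToLeft_alt player place board count
instance (player : String) (place : List Int) (board : List (List String)) (count : Int) (out : Int) : Decidable (Spec_checkDiagonalTopRightToLeft player place board count out) := by unfold Spec_checkDiagonalTopRightToLeft; infer_instance

-- ===== CLAIM (what is proved, stated in full; the proofs are below) =====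
def Claim_equal_checkDiagonalTopRightToLeft : Prop := ∀ (player : String) (place : List Int) (board : List (List String)) (count : Int), Dom_checkDiagonalTopRightToLeft player place board count → Pre_checkDiagonalTopRightToLeft player place board count → Spec_checkDiagonalTopRightToLeft player place board count (checkDiagonalTopRightToLeft player place board count)

-- ===== LEMMAS AND PROOFS =====

-- the run counter of B only shifts its result: bRun … n = n + bRun … 0
theorem bRun_acc (player : String) (board : List (List String)) :
    ∀ (row col n₁ n₂ : Int),
      bRun player board row col n₁ - n₁ = bRun player board row col n₂ - n₂ := by
  intro row col n₁ n₂
  fun_induction bRun player board row col n₁ generalizing n₂ with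
  | case1 row col n hr => rw [bRun.eq_def]; split <;> simp_all
  | case2 row col n brow hr hc => rw [bRun.eq_def]; split <;> simp_all
  | case3 row col n brow hr spot hc hp ih =>
      rw [bRun.eq_def (n := n₂)]
      split
      · simp_all
      · rename_i brow2 hr2
        rw [hr] at hr2; cases hr2
        have := ih (n₂ + 1)
        simp only [hc, hp, if_pos]
        omega
  | case4 row col n brow hr spot hc hp =>
      rw [bRun.eq_def (n := n₂)]
      split
      · simp
      · rename_i brow2 hr2
        rw [hr] at hr2; cases hr2
        simp [hc, hp]

-- A's recursion equals count plus B's run, for every starting cell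
theorem a_eq_b (player : String) (board : List (List String)) :
    ∀ (place : List Int) (count : Int),
      checkDiagonalTopRightToLeft player place board count
        = checkDiagonalTopRightToLeft_alt player place board count := by
  intro place count
  fun_induction checkDiagonalTopRightToLeft player place board count with
  | case1 place count h0 =>
      rw [checkDiagonalTopRightToLeft_alt]
      simp [h0]
  | case2 place count row h0 h1 =>
      rw [checkDiagonalTopRightToLeft_alt]
      simp [h0, h1]
  | case3 place count row h0 col h1 hr =>
      rw [checkDiagonalTopRightToLeft_alt]
      simp only [h0, h1]
      rw [bRun.eq_def]
      split <;> simp_all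
  | case4 place count row h0 col h1 brow hr hc =>
      rw [checkDiagonalTopRightToLeft_alt]
      simp only [h0, h1]
      rw [bRun.eq_def]
      split <;> simp_all
  | case5 place count row h0 col h1 brow hr spot hc hp =>
      rw [checkDiagonalTopRightToLeft_alt]
      simp only [h0, h1]
      rw [bRun.eq_def]
      split <;> simp_all
  | case6 place count row h0 col h1 brow hr spot hc hp ih =>
      rw [checkDiagonalTopRightToLeft_alt]
      rw [checkDiagonalTopRightToLeft_alt] at ih
      have hsp : spot = player := by simpa using hp
      have hacc := bRun_acc player board (row + 1) (col - 1) 1 0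
      have h0' : PySem.List.pyGet? ([row + 1, col - 1] : List Int) 0 = some (row + 1) :=
        PySem.List.pyGet?_zero_cons _ _
      have h1' : PySem.List.pyGet? ([row + 1, col - 1] : List Int) 1 = some (col - 1) := by
        simp [PySem.List.pyGet?, PySem.List.pyIdx?]
      simp only [h0', h1'] at ih
      simp only [h0, h1]
      rw [bRun.eq_def]
      split
      · simp_all
      · rename_i brow2 hr2
        rw [hr] at hr2; cases hr2
        simp only [hc, hsp, BEq.rfl, if_pos, zero_add]
        omega

-- ===== VERDICT (by name: the statement is the Claim_ definition above) =====
theorem checkDiagonalTopRightToLeft_spec : Claim_equal_checkDiagonalTopRightToLeft := by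
  intro player place board count _ _
  exact a_eq_b player board place count
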